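-- pv_equiv track=rewrite | github.com/LandieTW/dim_reduct | knear_neighbors.py | major
-- ===== SOURCE A (Python) =====
-- from typing import Tuple, List, Dict
-- from collections import defaultdict, Counter
--
-- def major(
--         labels: List[str]
--     ) -> str:
--     """
--     Assumes that labels are ordered from nearest to farthest
--     """
--     counts = Counter(labels)
--     major_values, major_count = counts.most_common(1)[0]
--     n_majors = len([count for count in counts.values() if count == major_count])
--     if n_majors == 1:
--         return major_values
--     else:
--         return major(labels[:-1])
-- ===== SOURCE B (Python) =====
-- def major(labels):
--     # One forward pass: maintain counts, the max count, how many labels attain it,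
--     # and the current unique leader; remember the leader at the longest prefix
--     # whose maximum is unique (exactly what A's tail-peeling recursion returns).
--     leader = labels[0]
--     ans = labels[0]
--     counts = {}
--     maxc = 0
--     nmax = 0
--     for x in labels:
--         c = counts.get(x, 0) + 1
--         counts[x] = c
--         if c > maxc:
--             maxc, nmax, leader = c, 1, x
--         elif c == maxc:
--             nmax += 1
--         if nmax == 1:
--             ans = leader
--     return ans
-- ===== Notes on version B (the rewrite author's own statement) =====
-- stated objective: alternative
-- what changed: Replaces A's recursion (rebuilding a Counter and rescanning it for every peeled tail) by a single forward pass that maintains counts, the maximum count, the number of labels attaining it and the current unique leader, remembering the answer at the longest prefix with a unique maximum.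
import Mathlib
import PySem

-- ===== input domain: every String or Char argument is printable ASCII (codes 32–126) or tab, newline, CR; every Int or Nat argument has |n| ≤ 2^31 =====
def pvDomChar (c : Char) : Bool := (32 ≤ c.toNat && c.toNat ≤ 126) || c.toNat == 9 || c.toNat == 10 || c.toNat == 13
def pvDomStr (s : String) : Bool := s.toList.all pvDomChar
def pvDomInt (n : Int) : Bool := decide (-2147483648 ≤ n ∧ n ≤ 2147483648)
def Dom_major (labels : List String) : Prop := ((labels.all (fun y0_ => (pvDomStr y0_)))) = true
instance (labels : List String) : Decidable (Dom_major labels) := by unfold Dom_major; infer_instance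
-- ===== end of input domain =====

-- B replaces A's tail-peeling recursion by one forward pass with incremental counts (alternative algorithm; same observed cost).


-- ===== PORT A =====
def major (labels : List String) : String :=
  if h : labels = [] then ""   -- Python raises IndexError here (most_common(1)[0] on empty); excluded by Pre_major
  else
    let counts := PySem.Dict.counter labels
    -- counts.most_common(1)[0] = first item with maximal count (insertion order)
    match PySem.List.max? counts.items (fun p => p.2) with
    | none => ""                -- unreachable: counts is nonempty
    | some (majorValues, majorCount) =>
      let nMajors := ((counts.values.filter (fun c => c == majorCount)).length : Int)
      if nMajors == 1 then majorValues
      else major labels.dropLast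
termination_by labels.length
decreasing_by
  have : labels.length ≠ 0 := fun hz => h (List.eq_nil_of_length_eq_zero hz)
  simp [List.length_dropLast]; omega

-- ===== PORT B =====
-- state = (counts, maxc, nmax, leader, ans)
def majorAltStep (s : PySem.Dict String Int × Int × Int × String × String) (x : String) :
    PySem.Dict String Int × Int × Int × String × String :=
  let c := s.1.getD x 0 + 1
  let counts := s.1.insert x c
  let t : Int × Int × String :=
    if c > s.2.1 then (c, 1, x)
    else if c == s.2.1 then (s.2.1, s.2.2.1 + 1, s.2.2.2.1)
    else (s.2.1, s.2.2.1, s.2.2.2.1)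
  (counts, t.1, t.2.1, t.2.2, if t.2.1 == 1 then t.2.2 else s.2.2.2.2)

def major_alt (labels : List String) : String :=
  match labels with
  | [] => ""                    -- Python raises IndexError (labels[0]); excluded by Pre_major
  | x0 :: _ =>
    (labels.foldl majorAltStep (PySem.Dict.empty, 0, 0, x0, x0)).2.2.2.2

-- ===== PRECONDITION & SPEC =====
-- Pre_major excludes only the empty list, where both Pythons raise IndexError.
def Pre_major (labels : List String) : Prop := labels ≠ []
instance (labels : List String) : Decidable (Pre_major labels) := by unfold Pre_major; infer_instance
def pvWitness_major : List String := (["a", "b", "a"])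

def Spec_major (labels : List String) (out : String) : Prop := out = major_alt labels
instance (labels : List String) (out : String) : Decidable (Spec_major labels out) := by unfold Spec_major; infer_instance

-- ===== CLAIM (what is proved, stated in full; the proofs are below) =====
def Claim_equal_major : Prop := ∀ (labels : List String), Dom_major labels → Pre_major labels → Spec_major labels (major labels)

-- ===== LEMMAS AND PROOFS =====

-- invariant of B's fold state after processing l: counts table, running max, number of
-- keys attaining it, leader when unique, and the answer-so-far (= A's value on l)
def MajInv (l : List String) (s : PySem.Dict String Int × Int × Int × String × String) : Prop :=
  (∀ k, s.1.getD k 0 = (l.count k : Int))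
  ∧ (l = [] → s.2.1 = 0)
  ∧ (∀ k ∈ l, (l.count k : Int) ≤ s.2.1)
  ∧ (l ≠ [] → ∃ k ∈ l, (l.count k : Int) = s.2.1)
  ∧ s.2.2.1 = (((PySem.Set.ofList l).countP (fun k => (l.count k : Int) == s.2.1)) : Int)
  ∧ (s.2.2.1 = 1 → s.2.2.2.1 ∈ l ∧ (l.count s.2.2.2.1 : Int) = s.2.1)
  ∧ (l ≠ [] → s.2.2.2.2 = major l)

lemma eq_of_countP_eq_one {α : Type} (l : List α) (p : α → Bool) (h1 : l.countP p = 1)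
    {a b : α} (ha : a ∈ l) (hb : b ∈ l) (hpa : p a) (hpb : p b) : a = b := by
  rw [List.countP_eq_length_filter] at h1
  obtain ⟨c, hc⟩ := List.length_eq_one_iff.mp h1
  have ha' : a ∈ l.filter p := List.mem_filter.mpr ⟨ha, hpa⟩
  have hb' : b ∈ l.filter p := List.mem_filter.mpr ⟨hb, hpb⟩
  rw [hc] at ha' hb'
  simp only [List.mem_singleton] at ha' hb'
  rw [ha', hb']

lemma countP_pair {α : Type} (x : α) (p q : α → Bool) :
    ∀ (l : List α), (∀ k ∈ l, k ≠ x → p k = q k) → l.Nodup → x ∈ l →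
      l.countP q + (if p x then 1 else 0) = l.countP p + (if q x then 1 else 0)
  | [], _, _, hx => absurd hx (List.not_mem_nil)
  | a :: t, hag, hnd, hx => by
    rcases List.mem_cons.mp hx with rfl | hxt
    · have hagree : t.countP p = t.countP q := by
        apply List.countP_congr
        intro k hk
        have hkx : k ≠ x := fun he => ((List.nodup_cons.mp hnd).1 (he ▸ hk))
        rw [hag k (List.mem_cons_of_mem _ hk) hkx]
      rw [List.countP_cons, List.countP_cons, hagree]
      omega
    · have hax : a ≠ x := fun he => ((List.nodup_cons.mp hnd).1 (he ▸ hxt))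
      have hpa : p a = q a := hag a List.mem_cons_self hax
      have ih := countP_pair x p q t (fun k hk => hag k (List.mem_cons_of_mem _ hk))
        (List.nodup_cons.mp hnd).2 hxt
      rw [List.countP_cons, List.countP_cons, hpa]
      omega

lemma major_unfold (l : List String) (h : l ≠ []) (ks : String) (cs : Int)
    (hmax : PySem.List.max? (PySem.Dict.counter l).items (fun p => p.2) = some (ks, cs)) :
    major l = if (((((PySem.Dict.counter l).values.filter (fun c => c == cs)).length : Int)) == 1)
      then ks else major l.dropLast := by
  rw [major, dif_neg h]
  simp only [hmax]

-- A's one unfolding, expressed through the invariant's quantities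
lemma major_formula (l : List String) (h : l ≠ []) (M : Int)
    (hub : ∀ k ∈ l, (l.count k : Int) ≤ M) (hex : ∃ k ∈ l, (l.count k : Int) = M) :
    ∃ ks ∈ l, (l.count ks : Int) = M ∧
      major l = if (PySem.Set.ofList l).countP (fun k => ((l.count k : Int) == M)) = 1
                then ks else major l.dropLast := by
  obtain ⟨k0, hk0⟩ := List.exists_mem_of_ne_nil l h
  have hk0s : k0 ∈ (PySem.Dict.counter l).items.map (fun p => p.1) := by
    rw [PySem.Dict.items_counter]
    simp only [List.map_map, List.mem_map]
    exact ⟨k0, (PySem.Set.mem_ofList l k0).mpr hk0, rfl⟩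
  have hne : (PySem.Dict.counter l).items ≠ [] := by
    intro hnil; rw [hnil] at hk0s; exact (List.not_mem_nil) hk0s
  cases hmx : PySem.List.max? (PySem.Dict.counter l).items (fun p => p.2) with
  | none => exact absurd ((PySem.List.max?_eq_none_iff _ _).mp hmx) hne
  | some p =>
    obtain ⟨ks, cs⟩ := p
    have hmem := PySem.List.max?_mem hmx
    rw [PySem.Dict.items_counter] at hmem
    simp only [List.mem_map] at hmem
    obtain ⟨k1, hk1s, hk1e⟩ := hmem
    have hksl : ks ∈ l := by
      have he : k1 = ks := congrArg Prod.fst hk1e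
      rw [← he]
      exact (PySem.Set.mem_ofList l k1).mp hk1s
    have hcs : cs = (l.count ks : Int) := by
      have h1 : k1 = ks := congrArg Prod.fst hk1e
      have h2 : (l.count k1 : Int) = cs := congrArg Prod.snd hk1e
      rw [← h2, h1]
    have hcsM : cs = M := by
      obtain ⟨kw, hkwl, hkwc⟩ := hex
      have hwit : (kw, (l.count kw : Int)) ∈ (PySem.Dict.counter l).items := by
        rw [PySem.Dict.items_counter]
        exact List.mem_map.mpr ⟨kw, (PySem.Set.mem_ofList l kw).mpr hkwl, rfl⟩
      have hle := PySem.List.max?_isMax hmx _ hwit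
      simp only at hle
      have := hub ks hksl
      rw [hcs]
      omega
    refine ⟨ks, hksl, by rw [← hcs, hcsM], ?_⟩
    rw [major_unfold l h ks cs hmx]
    have hval : (PySem.Dict.counter l).values
        = ((PySem.Set.ofList l).map (fun k => (k, (l.count k : Int)))).map (fun p => p.2) := by
      show (PySem.Dict.counter l).items.map (fun p => p.2) = _
      rw [PySem.Dict.items_counter]
    have hlen : ((PySem.Dict.counter l).values.filter (fun c => c == cs)).length
        = (PySem.Set.ofList l).countP (fun k => ((l.count k : Int) == M)) := by
      rw [hval, List.map_map, ← List.countP_eq_length_filter, List.countP_map]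
      apply List.countP_congr
      intro k _
      simp only [Function.comp, hcsM]
    rw [hlen]
    by_cases h1 : (PySem.Set.ofList l).countP (fun k => ((l.count k : Int) == M)) = 1
    · rw [if_pos h1, if_pos (by rw [h1]; rfl)]
    · rw [if_neg h1, if_neg (by simpa using h1)]

lemma set_append (l : List String) (x : String) :
    PySem.Set.ofList (l ++ [x])
      = if x ∈ l then PySem.Set.ofList l else PySem.Set.ofList l ++ [x] := by
  rw [PySem.Set.ofList_eq_foldl (l ++ [x]), List.foldl_append, ← PySem.Set.ofList_eq_foldl l]
  show PySem.Set.add (PySem.Set.ofList l) x = _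
  by_cases hx : x ∈ l
  · simp [PySem.Set.add, PySem.Set.contains, (PySem.Set.mem_ofList l x).mpr hx, hx]
  · simp [PySem.Set.add, PySem.Set.contains, hx, mt (PySem.Set.mem_ofList l x).mp hx]

lemma count_append_ne (l : List String) (x k : String) (hk : k ≠ x) :
    (l ++ [x]).count k = l.count k := by
  rw [List.count_append, show List.count k [x] = 0 from List.count_eq_zero.mpr (by simp [hk]),
    Nat.add_zero]

lemma inv_step (l : List String) (x : String)
    (s : PySem.Dict String Int × Int × Int × String × String) (hs : MajInv l s) :
    MajInv (l ++ [x]) (majorAltStep s x) := by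
  obtain ⟨d, m, n, ld, an⟩ := s
  obtain ⟨h1, h2, h3, h4, h5, h6, h7⟩ := hs
  simp only at h1 h2 h3 h4 h5 h6 h7
  have hcx : (l ++ [x]).count x = l.count x + 1 := by simp
  have hm0 : 0 ≤ m := by
    by_cases hl : l = []
    · rw [h2 hl]
    · obtain ⟨k, hkl, hke⟩ := h4 hl
      have := List.count_pos_iff.mpr hkl
      omega
  -- the new counts table is correct in every branch
  have h1' : ∀ k, (d.insert x ((l.count x : Int) + 1)).getD k 0 = ((l ++ [x]).count k : Int) := by
    intro k
    by_cases hk : k = x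
    · subst hk
      rw [PySem.Dict.getD_insert_self, hcx]
      push_cast; ring
    · rw [PySem.Dict.getD_insert_of_ne _ _ _ hk, h1, count_append_ne l x k hk]
  simp only [majorAltStep]
  rw [h1 x]
  by_cases hgt : ((l.count x : Int) + 1 > m)
  · -- new maximum: state becomes (counts', c, 1, x, x)
    rw [if_pos hgt]
    show MajInv (l ++ [x]) (d.insert x ((l.count x : Int) + 1), (l.count x : Int) + 1, 1, x, x)
    unfold MajInv
    try simp only []
    have hq1 : (PySem.Set.ofList (l ++ [x])).countP
        (fun k => (((l ++ [x]).count k : Int) == (l.count x : Int) + 1)) = 1 := by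
      have hqx : ((((l ++ [x]).count x : Int)) == (l.count x : Int) + 1) = true := by
        rw [hcx]; push_cast; simp
      have hother : ∀ k ∈ l, k ≠ x → ((((l ++ [x]).count k : Int)) == (l.count x : Int) + 1) = false := by
        intro k hkl hkx
        rw [count_append_ne l x k hkx]
        have := h3 k hkl
        simp only [beq_eq_false_iff_ne, ne_eq]
        omega
      rw [set_append]
      by_cases hx : x ∈ l
      · rw [if_pos hx]
        have hpz : (PySem.Set.ofList l).countP (fun k => ((l.count k : Int) == (l.count x : Int) + 1)) = 0 := by
          rw [List.countP_eq_zero]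
          intro k hks
          have hkl := (PySem.Set.mem_ofList l k).mp hks
          have := h3 k hkl
          simp only [beq_eq_false_iff_ne, ne_eq, Bool.not_eq_true, beq_eq_false_iff_ne]
          omega
        have hpair := countP_pair x
          (fun k => ((l.count k : Int) == (l.count x : Int) + 1))
          (fun k => (((l ++ [x]).count k : Int) == (l.count x : Int) + 1))
          (PySem.Set.ofList l)
          (fun k _ hkx => by simp only []; rw [count_append_ne l x k hkx])
          (PySem.Set.nodup_ofList l) ((PySem.Set.mem_ofList l x).mpr hx)
        have hpxf : (((l.count x : Int)) == (l.count x : Int) + 1) = false := by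
          simp only [beq_eq_false_iff_ne, ne_eq]; omega
        simp only [hpz, hpxf, hqx, if_false, if_true, Bool.false_eq_true] at hpair
        omega
      · rw [if_neg hx, List.countP_append]
        have hz : (PySem.Set.ofList l).countP
            (fun k => (((l ++ [x]).count k : Int) == (l.count x : Int) + 1)) = 0 := by
          rw [List.countP_eq_zero]
          intro k hks
          have hkl := (PySem.Set.mem_ofList l k).mp hks
          have hkx : k ≠ x := fun he => hx (he ▸ hkl)
          simp only [Bool.not_eq_true]
          exact hother k hkl hkx
        rw [hz, List.countP_cons, List.countP_nil]
        simp only [hqx, if_true]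
    refine ⟨h1', by simp, ?_, ?_, ?_, ?_, ?_⟩
    · intro k hk
      rcases List.mem_append.mp hk with hkl | hkx
      · by_cases hke : k = x
        · subst hke; rw [hcx]; push_cast; omega
        · rw [count_append_ne l x k hke]
          have := h3 k hkl
          omega
      · have : k = x := by simpa using hkx
        subst this; rw [hcx]; push_cast; omega
    · intro _
      exact ⟨x, by simp, by rw [hcx]; push_cast; ring⟩
    · rw [hq1]; rfl
    · intro _
      exact ⟨by simp, by rw [hcx]; push_cast; ring⟩
    · intro _
      obtain ⟨ks, hksl, hksc, heq⟩ := major_formula (l ++ [x]) (by simp) ((l.count x : Int) + 1)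
        (by
          intro k hk
          rcases List.mem_append.mp hk with hkl | hkx
          · by_cases hke : k = x
            · subst hke; rw [hcx]; push_cast; omega
            · rw [count_append_ne l x k hke]; have := h3 k hkl; omega
          · have : k = x := by simpa using hkx
            subst this; rw [hcx]; push_cast; omega)
        ⟨x, by simp, by rw [hcx]; push_cast; ring⟩
      rw [heq, if_pos hq1]
      have hkq : ((((l ++ [x]).count ks : Int)) == (l.count x : Int) + 1) = true := by
        rw [hksc]; exact beq_self_eq_true _
      have hxq : ((((l ++ [x]).count x : Int)) == (l.count x : Int) + 1) = true := by
        rw [hcx]; push_cast; simp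
      have := eq_of_countP_eq_one _ _ hq1
        ((PySem.Set.mem_ofList (l ++ [x]) ks).mpr hksl)
        ((PySem.Set.mem_ofList (l ++ [x]) x).mpr (by simp)) hkq hxq
      exact this.symm
  · -- maximum not beaten: l is nonempty and m stays
    rw [if_neg hgt]
    have hm1 : 1 ≤ m := by
      have : (0:Int) ≤ (l.count x : Int) := Int.natCast_nonneg _
      omega
    have hl : l ≠ [] := by
      intro he; rw [h2 he] at hm1; omega
    have hln : l ++ [x] ≠ [] := by simp
    have hcnt' : ∀ k ∈ l ++ [x], ((l ++ [x]).count k : Int) ≤ m := by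
      intro k hk
      rcases List.mem_append.mp hk with hkl | hkx
      · by_cases hke : k = x
        · subst hke; rw [hcx]; push_cast; omega
        · rw [count_append_ne l x k hke]; have := h3 k hkl; omega
      · have : k = x := by simpa using hkx
        subst this; rw [hcx]; push_cast; omega
    by_cases heq : ((l.count x : Int) + 1 = m)
    · -- ties the maximum: nmax grows by one, cannot be unique now
      have hbeq : (((l.count x : Int) + 1) == m) = true := by simpa using heq
      rw [hbeq, if_pos rfl]
      show MajInv (l ++ [x])
        (d.insert x ((l.count x : Int) + 1), m, n + 1, ld, if (n + 1 == 1) = true then ld else an)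
      unfold MajInv
      try simp only []
      have hpxf : (((l.count x : Int)) == m) = false := by
        simp only [beq_eq_false_iff_ne, ne_eq]; omega
      have hqxt : ((((l ++ [x]).count x : Int)) == m) = true := by
        rw [hcx]; push_cast; simpa using heq
      have hq : (PySem.Set.ofList (l ++ [x])).countP
          (fun k => (((l ++ [x]).count k : Int) == m))
          = (PySem.Set.ofList l).countP (fun k => ((l.count k : Int) == m)) + 1 := by
        rw [set_append]
        by_cases hx : x ∈ l
        · rw [if_pos hx]
          have hpair := countP_pair x
            (fun k => ((l.count k : Int) == m))
            (fun k => (((l ++ [x]).count k : Int) == m))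
            (PySem.Set.ofList l)
            (fun k _ hkx => by simp only []; rw [count_append_ne l x k hkx])
            (PySem.Set.nodup_ofList l) ((PySem.Set.mem_ofList l x).mpr hx)
          simp only [hpxf, hqxt, if_false, if_true, Bool.false_eq_true] at hpair
          omega
        · rw [if_neg hx, List.countP_append, List.countP_cons, List.countP_nil]
          have hcg : (PySem.Set.ofList l).countP (fun k => (((l ++ [x]).count k : Int) == m))
              = (PySem.Set.ofList l).countP (fun k => ((l.count k : Int) == m)) := by
            apply List.countP_congr
            intro k hks
            have hkl := (PySem.Set.mem_ofList l k).mp hks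
            have hkx : k ≠ x := fun he => hx (he ▸ hkl)
            rw [count_append_ne l x k hkx]
          rw [hcg]
          simp only [hqxt, if_true]
      have hnpos : 1 ≤ n := by
        obtain ⟨k, hkl, hke⟩ := h4 hl
        have : 0 < (PySem.Set.ofList l).countP (fun k => ((l.count k : Int) == m)) := by
          apply List.countP_pos_iff.mpr
          exact ⟨k, (PySem.Set.mem_ofList l k).mpr hkl, by simpa using hke⟩
        omega
      refine ⟨h1', by simp, hcnt', ?_, ?_, ?_, ?_⟩
      · intro _
        exact ⟨x, by simp, by rw [hcx]; push_cast; omega⟩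
      · rw [hq]; push_cast; omega
      · intro habs; omega
      · intro _
        have hnb : ((n + 1 : Int) == 1) = false := by
          simp only [beq_eq_false_iff_ne, ne_eq]; omega
        rw [hnb, if_neg (by simp)]
        obtain ⟨ks, hksl, hksc, heqA⟩ := major_formula (l ++ [x]) hln m hcnt'
          ⟨x, by simp, by rw [hcx]; push_cast; omega⟩
        rw [heqA, if_neg (by rw [hq]; omega), List.dropLast_concat]
        exact h7 hl
    · -- strictly below the maximum: everything else is unchanged
      have hbeq : (((l.count x : Int) + 1) == m) = false := by simpa using heq
      rw [hbeq, if_neg (by simp)]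
      show MajInv (l ++ [x])
        (d.insert x ((l.count x : Int) + 1), m, n, ld, if (n == 1) = true then ld else an)
      unfold MajInv
      try simp only []
      have hlt : (l.count x : Int) + 1 < m := by omega
      have hqxf : ((((l ++ [x]).count x : Int)) == m) = false := by
        rw [hcx]; push_cast
        simp only [beq_eq_false_iff_ne, ne_eq]; omega
      have hpxf : (((l.count x : Int)) == m) = false := by
        simp only [beq_eq_false_iff_ne, ne_eq]; omega
      have hq : (PySem.Set.ofList (l ++ [x])).countP
          (fun k => (((l ++ [x]).count k : Int) == m))
          = (PySem.Set.ofList l).countP (fun k => ((l.count k : Int) == m)) := by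
        rw [set_append]
        by_cases hx : x ∈ l
        · rw [if_pos hx]
          have hpair := countP_pair x
            (fun k => ((l.count k : Int) == m))
            (fun k => (((l ++ [x]).count k : Int) == m))
            (PySem.Set.ofList l)
            (fun k _ hkx => by simp only []; rw [count_append_ne l x k hkx])
            (PySem.Set.nodup_ofList l) ((PySem.Set.mem_ofList l x).mpr hx)
          simp only [hpxf, hqxf, if_false, Bool.false_eq_true] at hpair
          omega
        · rw [if_neg hx, List.countP_append, List.countP_cons, List.countP_nil]
          have hcg : (PySem.Set.ofList l).countP (fun k => (((l ++ [x]).count k : Int) == m))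
              = (PySem.Set.ofList l).countP (fun k => ((l.count k : Int) == m)) := by
            apply List.countP_congr
            intro k hks
            have hkl := (PySem.Set.mem_ofList l k).mp hks
            have hkx : k ≠ x := fun he => hx (he ▸ hkl)
            rw [count_append_ne l x k hkx]
          rw [hcg]
          simp only [hqxf, Bool.false_eq_true, if_false]
          omega
      have hex' : ∃ k ∈ l ++ [x], ((l ++ [x]).count k : Int) = m := by
        obtain ⟨k, hkl, hke⟩ := h4 hl
        have hkx : k ≠ x := by
          intro he; subst he; omega
        exact ⟨k, List.mem_append_left _ hkl, by rw [count_append_ne l x k hkx]; exact hke⟩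
      refine ⟨h1', by simp, hcnt', fun _ => hex', ?_, ?_, ?_⟩
      · rw [hq]; exact h5
      · intro hn1
        obtain ⟨hldl, hldc⟩ := h6 hn1
        have hldx : ld ≠ x := by
          intro he; subst he; omega
        exact ⟨List.mem_append_left _ hldl, by rw [count_append_ne l x ld hldx]; exact hldc⟩
      · intro _
        obtain ⟨ks, hksl, hksc, heqA⟩ := major_formula (l ++ [x]) hln m hcnt' hex'
        by_cases hn1 : n = 1
        · obtain ⟨hldl, hldc⟩ := h6 hn1
          have hldx : ld ≠ x := by intro he; subst he; omega
          have hq1 : (PySem.Set.ofList (l ++ [x])).countP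
              (fun k => (((l ++ [x]).count k : Int) == m)) = 1 := by
            rw [hq]
            have : ((PySem.Set.ofList l).countP (fun k => ((l.count k : Int) == m)) : Int) = 1 := by
              rw [← h5, hn1]
            exact_mod_cast this
          rw [heqA, if_pos hq1]
          have hkq : ((((l ++ [x]).count ks : Int)) == m) = true := by
            rw [hksc]; exact beq_self_eq_true _
          have hlq : ((((l ++ [x]).count ld : Int)) == m) = true := by
            rw [count_append_ne l x ld hldx, hldc]; exact beq_self_eq_true _
          have := eq_of_countP_eq_one _ _ hq1
            ((PySem.Set.mem_ofList (l ++ [x]) ks).mpr hksl)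
            ((PySem.Set.mem_ofList (l ++ [x]) ld).mpr (List.mem_append_left _ hldl)) hkq hlq
          rw [hn1]
          simp only [beq_self_eq_true, if_true]
          exact this.symm
        · have hnb : ((n : Int) == 1) = false := by
            simp only [beq_eq_false_iff_ne, ne_eq]
            exact fun he => hn1 he
          rw [hnb, if_neg (by simp)]
          rw [heqA, if_neg (by
            rw [hq]
            intro hcp
            apply hn1
            rw [h5, hcp]; rfl), List.dropLast_concat]
          exact h7 hl

lemma inv_holds (l : List String) (x0 : String) :
    MajInv l (l.foldl majorAltStep (PySem.Dict.empty, 0, 0, x0, x0)) := by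
  induction l using List.reverseRecOn with
  | nil =>
    refine ⟨?_, fun _ => rfl, by simp, by simp, by simp [PySem.Set.ofList], fun h => by simp at h, by simp⟩
    intro k
    simp [PySem.Dict.getD_empty]
  | append_singleton l x ih =>
    rw [List.foldl_append]
    exact inv_step l x _ ih

theorem major_eq_alt (l : List String) (h : l ≠ []) : major l = major_alt l := by
  match l, h with
  | x0 :: rest, _ =>
    have hi := inv_holds (x0 :: rest) x0
    have hans := hi.2.2.2.2.2.2 (by simp)
    show major (x0 :: rest) = ((x0 :: rest).foldl majorAltStep (PySem.Dict.empty, 0, 0, x0, x0)).2.2.2.2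
    exact hans.symm

-- ===== VERDICT (by name: the statement is the Claim_ definition above) =====
theorem major_spec : Claim_equal_major := by
  intro labels _ hpre
  unfold Spec_major
  exact major_eq_alt labels hpre
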